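-- pv_equiv track=rewrite | github.com/jgilles23/projectEuler | pe215.py | computeCrackOptions
-- ===== SOURCE A (Python) =====
-- def computeCrackOptions(currentLength=0, targetLength=0, currentCrackPattern=0):
--     withTwoBrick = 2<<(currentLength + 1) |currentCrackPattern
--     withThreeBrick = 4<<(currentLength + 1) | currentCrackPattern
--     if targetLength - currentLength <= 1:
--         return [] #No possible patterns, we shouldn't get here
--     elif targetLength - currentLength == 2:
--         return [currentCrackPattern] #0Existing
--     elif targetLength - currentLength == 3:
--         return [currentCrackPattern] #00Existing
--     else:
--         return computeCrackOptions(currentLength+2, targetLength, withTwoBrick) + computeCrackOptions(currentLength+3, targetLength, withThreeBrick)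
-- ===== SOURCE B (Python) =====
-- def computeCrackOptions(currentLength=0, targetLength=0, currentCrackPattern=0):
--     # Iterative re-implementation: explicit LIFO stack, preorder accumulation.
--     results = []
--     stack = [(currentLength, currentCrackPattern)]
--     while stack:
--         c, p = stack.pop()
--         diff = targetLength - c
--         if diff <= 1:
--             continue
--         if diff == 2 or diff == 3:
--             results.append(p)
--             continue
--         withTwoBrick = 2 << (c + 1) | p
--         withThreeBrick = 4 << (c + 1) | p
--         stack.append((c + 3, withThreeBrick))
--         stack.append((c + 2, withTwoBrick))
--     return results
-- ===== Notes on version B (the rewrite author's own statement) =====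
-- stated objective: alternative
-- what changed: Replaces A's binary recursion (concatenating the two recursive sublists) with an iterative explicit LIFO stack of (length, pattern) states that appends finished patterns to one accumulator in preorder.
import Mathlib
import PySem

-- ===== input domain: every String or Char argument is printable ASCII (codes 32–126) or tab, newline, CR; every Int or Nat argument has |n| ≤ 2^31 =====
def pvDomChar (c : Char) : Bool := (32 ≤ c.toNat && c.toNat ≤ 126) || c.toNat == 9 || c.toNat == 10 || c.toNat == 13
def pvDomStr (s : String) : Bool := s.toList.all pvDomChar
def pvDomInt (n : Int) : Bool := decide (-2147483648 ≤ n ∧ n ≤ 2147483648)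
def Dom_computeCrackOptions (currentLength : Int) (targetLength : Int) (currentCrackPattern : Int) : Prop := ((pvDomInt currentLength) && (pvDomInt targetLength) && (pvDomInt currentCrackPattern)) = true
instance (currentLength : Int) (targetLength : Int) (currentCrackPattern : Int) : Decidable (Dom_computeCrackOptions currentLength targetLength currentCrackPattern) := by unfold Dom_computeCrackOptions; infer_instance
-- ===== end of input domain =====

-- B replaces A's binary recursion with an explicit LIFO stack and a single accumulator
-- (same preorder result, same cost).

-- ===== PORT A =====
-- literal port of A, with a Nat fuel guard that only makes the recursion structural
-- (fuel (targetLength-currentLength).toNat is provably sufficient, so the 0-fuel branch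
-- is never reached); Python's unconditional `2 << (currentLength+1)` raises ValueError
-- for currentLength ≤ -2, which Pre_ excludes; the port uses .toNat there.
def crackRec (fuel : Nat) (currentLength : Int) (targetLength : Int) (currentCrackPattern : Int) : List Int :=
  let withTwoBrick := PySem.Int.bor ((2 : Int) <<< (currentLength + 1).toNat) currentCrackPattern
  let withThreeBrick := PySem.Int.bor ((4 : Int) <<< (currentLength + 1).toNat) currentCrackPattern
  if targetLength - currentLength ≤ 1 then []
  else if targetLength - currentLength = 2 then [currentCrackPattern]
  else if targetLength - currentLength = 3 then [currentCrackPattern]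
  else
    match fuel with
    | 0 => []  -- unreachable with sufficient fuel
    | fuel + 1 =>
      crackRec fuel (currentLength + 2) targetLength withTwoBrick ++
      crackRec fuel (currentLength + 3) targetLength withThreeBrick

def computeCrackOptions (currentLength : Int) (targetLength : Int) (currentCrackPattern : Int) : List Int :=
  crackRec (targetLength - currentLength).toNat currentLength targetLength currentCrackPattern

-- ===== PORT B =====
-- the while loop of Source B: pop a state, handle it, push the two successors (two-brick on top);
-- the Nat fuel (2 ^ (targetLength - currentLength).toNat is provably sufficient) only makes
-- the loop structural; the [] at 0 fuel is never reached.
def crackLoop (fuel : Nat) (targetLength : Int) (stack : List (Int × Int)) (results : List Int) : List Int :=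
  match stack with
  | [] => results
  | (c, p) :: rest =>
    match fuel with
    | 0 => results  -- unreachable with sufficient fuel
    | fuel + 1 =>
      if targetLength - c ≤ 1 then crackLoop fuel targetLength rest results
      else if targetLength - c = 2 ∨ targetLength - c = 3 then
        crackLoop fuel targetLength rest (results ++ [p])
      else
        let withTwoBrick := PySem.Int.bor ((2 : Int) <<< (c + 1).toNat) p
        let withThreeBrick := PySem.Int.bor ((4 : Int) <<< (c + 1).toNat) p
        crackLoop fuel targetLength ((c + 2, withTwoBrick) :: (c + 3, withThreeBrick) :: rest) results

def computeCrackOptions_alt (currentLength : Int) (targetLength : Int) (currentCrackPattern : Int) : List Int :=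
  crackLoop (2 ^ (targetLength - currentLength).toNat) targetLength
    [(currentLength, currentCrackPattern)] []

-- ===== PRECONDITION & SPEC =====
-- Pre_ excludes exactly the inputs where Python's A raises ValueError: currentLength ≤ -2
-- makes A's unconditional `2 << (currentLength+1)` a negative shift.
def Pre_computeCrackOptions (currentLength : Int) (targetLength : Int) (currentCrackPattern : Int) : Prop :=
  -1 ≤ currentLength
instance (currentLength : Int) (targetLength : Int) (currentCrackPattern : Int) : Decidable (Pre_computeCrackOptions currentLength targetLength currentCrackPattern) := by unfold Pre_computeCrackOptions; infer_instance
def pvWitness_computeCrackOptions : Int × Int × Int := (0, 10, 0)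

def Spec_computeCrackOptions (currentLength : Int) (targetLength : Int) (currentCrackPattern : Int) (out : List Int) : Prop := out = computeCrackOptions_alt currentLength targetLength currentCrackPattern
instance (currentLength : Int) (targetLength : Int) (currentCrackPattern : Int) (out : List Int) : Decidable (Spec_computeCrackOptions currentLength targetLength currentCrackPattern out) := by unfold Spec_computeCrackOptions; infer_instance

-- ===== CLAIM (what is proved, stated in full; the proofs are below) =====
def Claim_equal_computeCrackOptions : Prop := ∀ (currentLength : Int) (targetLength : Int) (currentCrackPattern : Int), Dom_computeCrackOptions currentLength targetLength currentCrackPattern → Pre_computeCrackOptions currentLength targetLength currentCrackPattern → Spec_computeCrackOptions currentLength targetLength currentCrackPattern (computeCrackOptions currentLength targetLength currentCrackPattern)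

-- ===== LEMMAS AND PROOFS =====

-- fuel irrelevance for A's recursion: any sufficient fuel gives the same value
theorem crackRec_fuel (f1 f2 : Nat) (t : Int) : ∀ (c p : Int),
    (t - c).toNat ≤ f1 → (t - c).toNat ≤ f2 →
    crackRec f1 c t p = crackRec f2 c t p := by
  induction f1 generalizing f2 with
  | zero =>
    intro c p h1 _
    rw [crackRec.eq_def, crackRec.eq_def]
    have hle : t - c ≤ 1 := by omega
    simp [hle]
  | succ f1 ih =>
    intro c p h1 h2
    rw [crackRec.eq_def, crackRec.eq_def]
    by_cases hle : t - c ≤ 1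
    · simp [hle]
    · by_cases he2 : t - c = 2
      · simp [hle, he2]
      · by_cases he3 : t - c = 3
        · simp [hle, he2, he3]
        · have h4 : 4 ≤ t - c := by omega
          have hf2 : f2 ≠ 0 := by omega
          obtain ⟨f2', rfl⟩ := Nat.exists_eq_succ_of_ne_zero hf2
          simp only [if_neg hle, if_neg he2, if_neg he3]
          rw [ih f2' (c + 2) _ (by omega) (by omega),
              ih f2' (c + 3) _ (by omega) (by omega)]

-- loop invariant: with sufficient fuel the stack loop appends, in order,
-- A's result for each stacked state
theorem crackLoop_eq (t : Int) (fuel : Nat) : ∀ (stack : List (Int × Int)) (results : List Int),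
    (stack.map (fun s => 2 ^ (t - s.1).toNat)).sum ≤ fuel →
    crackLoop fuel t stack results
      = results ++ stack.flatMap (fun s => computeCrackOptions s.1 t s.2) := by
  induction fuel with
  | zero =>
    intro stack results hf
    match stack with
    | [] => simp [crackLoop]
    | (c, p) :: rest =>
      exfalso
      have : 0 < 2 ^ (t - c).toNat := Nat.pow_pos (by norm_num)
      simp only [List.map_cons, List.sum_cons] at hf
      omega
  | succ fuel ih =>
    intro stack results hf
    match stack with
    | [] => simp [crackLoop]
    | (c, p) :: rest =>
      simp only [List.map_cons, List.sum_cons] at hf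
      have hpos : 0 < 2 ^ (t - c).toNat := Nat.pow_pos (by norm_num)
      rw [crackLoop]
      simp only [List.flatMap_cons]
      by_cases hle : t - c ≤ 1
      · rw [if_pos hle, ih rest results (by omega)]
        have : computeCrackOptions c t p = [] := by
          rw [computeCrackOptions, crackRec.eq_def]; simp [hle]
        simp [this]
      · by_cases h23 : t - c = 2 ∨ t - c = 3
        · rw [if_neg hle, if_pos h23, ih rest (results ++ [p]) (by omega)]
          have : computeCrackOptions c t p = [p] := by
            rw [computeCrackOptions, crackRec.eq_def]
            rcases h23 with h | h <;> simp [h]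
          simp [this]
        · have he2 : ¬ t - c = 2 := fun h => h23 (Or.inl h)
          have he3 : ¬ t - c = 3 := fun h => h23 (Or.inr h)
          have h4 : 4 ≤ t - c := by omega
          rw [if_neg hle, if_neg h23]
          have hd2 : (t - (c + 2)).toNat = (t - c).toNat - 2 := by omega
          have hd3 : (t - (c + 3)).toNat = (t - c).toNat - 3 := by omega
          have hd4 : 4 ≤ (t - c).toNat := by omega
          have hsum : 2 ^ ((t - c).toNat - 2) + 2 ^ ((t - c).toNat - 3) + 1
              ≤ 2 ^ (t - c).toNat := by
            set d := (t - c).toNat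
            have hle' : (2:ℕ) ^ (d - 3) ≤ 2 ^ (d - 2) := Nat.pow_le_pow_right (by norm_num) (by omega)
            have e1 : (2:ℕ) ^ (d - 1) = 2 * 2 ^ (d - 2) := by rw [← pow_succ']; congr 1; omega
            have elt : (2:ℕ) ^ (d - 1) < 2 ^ d := Nat.pow_lt_pow_right (by norm_num) (by omega)
            omega
          rw [ih _ results (by simp only [List.map_cons, List.sum_cons]; rw [hd2, hd3]; omega)]
          simp only [List.flatMap_cons]
          have hA : computeCrackOptions c t p
              = computeCrackOptions (c + 2) t (PySem.Int.bor ((2 : Int) <<< (c + 1).toNat) p) ++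
                computeCrackOptions (c + 3) t (PySem.Int.bor ((4 : Int) <<< (c + 1).toNat) p) := by
            rw [computeCrackOptions, crackRec.eq_def]
            simp only [if_neg hle, if_neg he2, if_neg he3]
            have hne : (t - c).toNat ≠ 0 := by omega
            obtain ⟨f', hf'⟩ := Nat.exists_eq_succ_of_ne_zero hne
            rw [hf']
            show crackRec f' (c + 2) t (PySem.Int.bor ((2 : Int) <<< (c + 1).toNat) p) ++
                crackRec f' (c + 3) t (PySem.Int.bor ((4 : Int) <<< (c + 1).toNat) p) = _
            rw [computeCrackOptions, computeCrackOptions,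
                crackRec_fuel f' (t - (c + 2)).toNat t (c + 2) _ (by omega) (by omega),
                crackRec_fuel f' (t - (c + 3)).toNat t (c + 3) _ (by omega) (by omega)]
          rw [hA]
          simp [List.append_assoc]

-- ===== VERDICT (by name: the statement is the Claim_ definition above) =====
theorem computeCrackOptions_spec : Claim_equal_computeCrackOptions := by
  intro c t p _ _
  unfold Spec_computeCrackOptions computeCrackOptions_alt
  rw [crackLoop_eq t _ [(c, p)] [] (by simp)]
  simp
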